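-- pv_equiv track=rewrite | github.com/abu-rayhan-alif/djangoSecurityHunter | src/djangoguard/collectors/secrets_and_logging_scan.py | _identifier_sensitive
-- ===== SOURCE A (Python) =====
-- _SENSITIVE_NAME_PARTS = (
--     "password",
--     "passwd",
--     "token",
--     "secret",
--     "api_key",
--     "apikey",
--     "bearer",
--     "credential",
--     "authorization",
--     "private_key",
--     "access_key",
--     "client_secret",
--     "csrf",
-- )
--
-- _FALSE_NAME_POSITIVE = frozenset(
--     {
--         "author",
--         "authority",
--         "authors",
--         "authentic",
--         "authentication",
--         "authenticator",
--     }
-- )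
--
-- def _identifier_sensitive(name: str) -> bool:
--     lower = name.lower()
--     if lower in _FALSE_NAME_POSITIVE:
--         return False
--     for part in _SENSITIVE_NAME_PARTS:
--         if part in lower:
--             return True
--     return False
-- ===== SOURCE B (Python) =====
-- _SENSITIVE_NAME_PARTS = (
--     "password",
--     "passwd",
--     "token",
--     "secret",
--     "api_key",
--     "apikey",
--     "bearer",
--     "credential",
--     "authorization",
--     "private_key",
--     "access_key",
--     "client_secret",
--     "csrf",
-- )
--
-- _FALSE_NAME_POSITIVE = frozenset(
--     {
--         "author",
--         "authority",
--         "authors",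
--         "authentic",
--         "authentication",
--         "authenticator",
--     }
-- )
--
--
-- def _identifier_sensitive(name: str) -> bool:
--     # Single position-major pass: at each position of the lowered name, test
--     # whether any sensitive part starts there (instead of one full substring
--     # scan per part).
--     lower = name.lower()
--     if lower in _FALSE_NAME_POSITIVE:
--         return False
--     return any(
--         lower.startswith(part, i)
--         for i in range(len(lower))
--         for part in _SENSITIVE_NAME_PARTS
--     )
-- ===== Notes on version B (the rewrite author's own statement) =====
-- stated objective: alternative
-- what changed: Replaces the part-major loop of 13 independent full substring-containment scans with a single position-major pass over the lowered name that tests, at each index, whether any sensitive part starts there via startswith with an offset.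
import Mathlib
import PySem

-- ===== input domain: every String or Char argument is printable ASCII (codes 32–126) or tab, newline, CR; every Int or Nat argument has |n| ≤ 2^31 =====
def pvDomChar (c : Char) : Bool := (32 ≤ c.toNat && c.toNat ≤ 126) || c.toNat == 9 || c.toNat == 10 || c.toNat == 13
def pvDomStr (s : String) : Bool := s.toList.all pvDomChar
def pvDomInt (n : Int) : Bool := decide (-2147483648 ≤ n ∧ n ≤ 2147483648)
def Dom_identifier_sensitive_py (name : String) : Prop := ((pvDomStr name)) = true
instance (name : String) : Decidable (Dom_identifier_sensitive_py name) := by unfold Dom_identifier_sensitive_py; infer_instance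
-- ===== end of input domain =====

-- B replaces A's part-major loop of 13 full substring scans by a single
-- position-major pass testing, at each index, whether any part starts there
-- (alternative decomposition, same results).

-- ===== PORT A =====
-- module-level constants shared by both versions (identical in Source A and Source B)
def sensitiveNameParts : List String :=
  ["password", "passwd", "token", "secret", "api_key", "apikey", "bearer",
   "credential", "authorization", "private_key", "access_key", "client_secret", "csrf"]

def falseNamePositive : List String :=
  ["author", "authority", "authors", "authentic", "authentication", "authenticator"]

def identifier_sensitive_py (name : String) : Bool :=
  let lower := PySem.Str.lower name
  if falseNamePositive.contains lower then false
  else sensitiveNameParts.any (fun part => PySem.Str.isIn part lower)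

-- ===== PORT B =====
def identifier_sensitive_py_alt (name : String) : Bool :=
  let lower := PySem.Str.lower name
  if falseNamePositive.contains lower then false
  else
    -- any(lower.startswith(part, i) for i in range(len(lower)) for part in parts)
    let cs := lower.toList
    (List.range cs.length).any (fun i =>
      sensitiveNameParts.any (fun part => PySem.Chars.startswith (cs.drop i) part.toList))

-- ===== PRECONDITION & SPEC =====
def Spec_identifier_sensitive_py (name : String) (out : Bool) : Prop := out = identifier_sensitive_py_alt name
instance (name : String) (out : Bool) : Decidable (Spec_identifier_sensitive_py name out) := by unfold Spec_identifier_sensitive_py; infer_instance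

-- ===== CLAIM (what is proved, stated in full; the proofs are below) =====
def Claim_equal_identifier_sensitive_py : Prop := ∀ (name : String), Dom_identifier_sensitive_py name → Spec_identifier_sensitive_py name (identifier_sensitive_py name)

-- ===== LEMMAS AND PROOFS =====

-- a nonempty pattern occurs in cs iff it starts at some position of cs
theorem isIn_eq_any_startswith (p cs : List Char) (hp : p ≠ []) :
    PySem.Chars.isIn p cs
      = (List.range cs.length).any (fun i => PySem.Chars.startswith (cs.drop i) p) := by
  rw [Bool.eq_iff_iff, PySem.Chars.isIn_iff_infix]
  simp only [PySem.Chars.startswith, List.any_eq_true, List.mem_range,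
    List.isPrefixOf_iff_prefix]
  constructor
  · rintro ⟨s, t, rfl⟩
    refine ⟨s.length, ?_, ?_⟩
    · have := List.length_pos_of_ne_nil hp
      simp; omega
    · rw [List.append_assoc, List.drop_left]
      exact ⟨t, rfl⟩
  · rintro ⟨i, _, hpre⟩
    exact List.infix_iff_prefix_suffix.mpr ⟨cs.drop i, hpre, List.drop_suffix i cs⟩

-- swap the order of the two quantifications (part-major vs position-major)
theorem any_isIn_eq_any_range (parts : List String) (cs : List Char)
    (h : ∀ p ∈ parts, p.toList ≠ []) :
    parts.any (fun p => PySem.Chars.isIn p.toList cs)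
      = (List.range cs.length).any (fun i =>
          parts.any (fun p => PySem.Chars.startswith (cs.drop i) p.toList)) := by
  rw [Bool.eq_iff_iff]
  simp only [List.any_eq_true]
  constructor
  · rintro ⟨p, hp, hin⟩
    rw [isIn_eq_any_startswith _ _ (h p hp)] at hin
    simp only [List.any_eq_true] at hin
    obtain ⟨i, hi, hs⟩ := hin
    exact ⟨i, hi, p, hp, hs⟩
  · rintro ⟨i, hi, p, hp, hs⟩
    refine ⟨p, hp, ?_⟩
    rw [isIn_eq_any_startswith _ _ (h p hp)]
    simp only [List.any_eq_true]
    exact ⟨i, hi, hs⟩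

-- ===== VERDICT (by name: the statement is the Claim_ definition above) =====
theorem identifier_sensitive_py_spec : Claim_equal_identifier_sensitive_py := by
  intro name _
  unfold Spec_identifier_sensitive_py identifier_sensitive_py identifier_sensitive_py_alt
  dsimp only
  split
  · rfl
  · exact any_isIn_eq_any_range sensitiveNameParts (PySem.Str.lower name).toList (by decide)
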